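-- pv_equiv track=rewrite | github.com/yu2799/AtCoder | abc/300/300/292D.py | bfs
-- ===== SOURCE A (Python) =====
-- from collections import deque
--
-- def bfs(graph, n, start):
--     dist = [-1] * n
--     dist[start] = 0
--     cnt = 0
--     next_visit = deque([start])
--     while next_visit:
--         cur = next_visit.popleft()
--         for i in graph[cur]:
--             cnt += 1
--             if dist[i] > -1:
--                 continue
--             dist[i] = dist[cur] + 1
--             next_visit.append(i)
--
--     return cnt // 2
-- ===== SOURCE B (Python) =====
-- def bfs(graph, n, start):
--     # Phase 1: pure traversal collecting the reachable vertices (boolean visited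
--     # list + growing frontier list with a read pointer; no distances, no counter).
--     # Phase 2: sum the degrees of the reached vertices.
--     visited = [False] * n
--     visited[start] = True
--     reach = [start]
--     i = 0
--     while i < len(reach):
--         for w in graph[reach[i]]:
--             if not visited[w]:
--                 visited[w] = True
--                 reach.append(w)
--         i += 1
--     return sum(len(graph[v]) for v in reach) // 2
-- ===== Notes on version B (the rewrite author's own statement) =====
-- stated objective: simpler
-- what changed: B replaces A's interleaved BFS (distance array, deque, edge counter updated inside the loop) by a pure traversal that only records the reachable vertices (boolean visited list + frontier list with a read pointer), followed by a separate pass summing the degrees of the reached vertices.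
-- outside the precondition, e.g. on bfs([[5]], 6, -1): A returns 0, B returns 0
import Mathlib
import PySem

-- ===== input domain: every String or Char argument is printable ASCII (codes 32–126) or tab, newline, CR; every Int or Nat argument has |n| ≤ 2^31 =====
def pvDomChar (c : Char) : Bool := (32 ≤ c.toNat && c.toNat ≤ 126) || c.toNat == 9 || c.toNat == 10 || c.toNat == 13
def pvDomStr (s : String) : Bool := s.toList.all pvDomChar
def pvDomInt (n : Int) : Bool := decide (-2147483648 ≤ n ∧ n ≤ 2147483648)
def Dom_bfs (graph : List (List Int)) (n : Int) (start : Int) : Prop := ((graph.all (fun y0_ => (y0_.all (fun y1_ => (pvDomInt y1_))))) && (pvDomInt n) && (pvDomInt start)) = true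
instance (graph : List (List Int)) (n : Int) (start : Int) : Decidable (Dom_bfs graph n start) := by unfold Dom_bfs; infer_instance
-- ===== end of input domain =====

-- B replaces A's interleaved BFS (distance array + deque + in-loop edge counter) by a pure
-- traversal collecting the reachable vertices, then a separate degree-summing pass (same cost).

-- ===== PORT A =====
-- while next_visit: pop left, then fold the for-loop over graph[cur] on state (dist, cnt, appended).
-- The fuel argument only makes the while-loop total (it never runs out: each enqueue marks a fresh
-- slot of dist, so iterations ≤ n+1); getD defaults stand where Python raises, outside Pre_.
def bfsLoopA (graph : List (List Int)) : Nat → List Int → Int → List Int → Int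
  | _, _, cnt, [] => cnt
  | 0, _, cnt, _ :: _ => cnt
  | fuel+1, dist, cnt, cur :: rest =>
    let s := (PySem.List.pyGetD graph cur []).foldl
      (fun (s : List Int × Int × List Int) i =>
        let cnt := s.2.1 + 1
        if PySem.List.pyGetD s.1 i 0 > -1 then (s.1, cnt, s.2.2)
        else (PySem.List.pySetD s.1 i (PySem.List.pyGetD s.1 cur 0 + 1), cnt, s.2.2 ++ [i]))
      (dist, cnt, [])
    bfsLoopA graph fuel s.1 s.2.1 (rest ++ s.2.2)

def bfs (graph : List (List Int)) (n : Int) (start : Int) : Int :=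
  let dist := PySem.List.pySetD (List.replicate n.toNat (-1)) start 0   -- dist = [-1]*n; dist[start] = 0
  PySem.Int.floordiv (bfsLoopA graph (2 * n.toNat + 2) dist 0 [start]) 2

-- ===== PORT B =====
-- Phase 1: pure traversal over (visited, reach) with a read pointer i (fuel = totality guard only;
-- the out-of-range read default of visited is arbitrary — Python raises there, outside Pre_).
def bfsLoopB (graph : List (List Int)) : Nat → List Bool → List Int → Nat → List Int
  | 0, _, reach, _ => reach
  | fuel+1, visited, reach, i =>
    if i < reach.length then
      let s := (PySem.List.pyGetD graph (PySem.List.pyGetD reach (i : Int) 0) []).foldl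
        (fun (s : List Bool × List Int) w =>
          if PySem.List.pyGetD s.1 w true then s
          else (PySem.List.pySetD s.1 w true, s.2 ++ [w]))
        (visited, reach)
      bfsLoopB graph fuel s.1 s.2 (i+1)
    else reach

def bfs_alt (graph : List (List Int)) (n : Int) (start : Int) : Int :=
  let visited := PySem.List.pySetD (List.replicate n.toNat false) start true  -- visited = [False]*n; visited[start] = True
  let reach := bfsLoopB graph (2 * n.toNat + 2) visited [start] 0
  -- Phase 2: sum(len(graph[v]) for v in reach) // 2
  PySem.Int.floordiv
    (reach.foldl (fun acc v => acc + ((PySem.List.pyGetD graph v []).length : Int)) 0) 2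

-- ===== PRECONDITION & SPEC =====
-- canonical list position of Python index i into a list of length len (only meaningful in range)
def nidxN (len : Nat) (i : Int) : Nat := if i < 0 then len - (-i).toNat else i.toNat

-- Pre_ admits exactly the inputs on which A completes without IndexError, certified by a set S of
-- row positions that contains start's row, is closed under edges, and whose rows carry only
-- entries in range for both dist and graph; it conservatively also excludes rare returning inputs
-- where an out-of-graph-range entry is only skipped because it aliases (mod n) an already visited
-- dist slot — there B returns A's value as well.
def Pre_bfs (graph : List (List Int)) (n : Int) (start : Int) : Prop :=
  (-n ≤ start ∧ start < n) ∧ (-(graph.length : Int) ≤ start ∧ start < graph.length) ∧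
  ∃ S ∈ (List.range graph.length).sublists,
    nidxN graph.length start ∈ S ∧
    ∀ p ∈ S, ∀ i ∈ graph.getD p [],
      (-n ≤ i ∧ i < n) ∧ (-(graph.length : Int) ≤ i ∧ i < graph.length) ∧
      nidxN graph.length i ∈ S
instance (graph : List (List Int)) (n : Int) (start : Int) : Decidable (Pre_bfs graph n start) := by
  unfold Pre_bfs; infer_instance

def pvWitness_bfs : List (List Int) × Int × Int := ([[1], [0, 2], [1]], 3, 0)

def Spec_bfs (graph : List (List Int)) (n : Int) (start : Int) (out : Int) : Prop := out = bfs_alt graph n start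
instance (graph : List (List Int)) (n : Int) (start : Int) (out : Int) : Decidable (Spec_bfs graph n start out) := by unfold Spec_bfs; infer_instance

-- ===== CLAIM (what is proved, stated in full; the proofs are below) =====
def Claim_equal_bfs : Prop := ∀ (graph : List (List Int)) (n : Int) (start : Int), Dom_bfs graph n start → Pre_bfs graph n start → Spec_bfs graph n start (bfs graph n start)

-- ===== LEMMAS AND PROOFS =====
-- (the ports are in fact proved equal on ALL inputs; the Pre_ hypothesis is not needed by the proof)

-- markedness of a dist entry: dist[p] > -1 in A is visited[p] = True in B
def markF (x : Int) : Bool := decide (-1 < x)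

-- degree of vertex v, as B's summing pass reads it
def degI (graph : List (List Int)) (v : Int) : Int := ((PySem.List.pyGetD graph v []).length : Int)

-- number of still-unvisited dist slots (termination measure)
def unmarkedL (dist : List Int) : Nat :=
  ((List.range dist.length).filter (fun (j : Nat) => decide (PySem.List.pyGetD dist (j : Int) 0 < 0))).length

lemma pyIdx?_char (len : Nat) (i : Int) :
    PySem.List.pyIdx? len i = if -(len:Int) ≤ i ∧ i < len then some (nidxN len i) else none := by
  simp only [PySem.List.pyIdx?, nidxN]
  split_ifs <;> first | rfl | omega

lemma pyGetD_none {α : Type} (xs : List α) (i : Int) (d : α) (h : ¬ (-(xs.length:Int) ≤ i ∧ i < xs.length)) :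
    PySem.List.pyGetD xs i d = d := by
  simp [PySem.List.pyGetD, PySem.List.pyGet?, pyIdx?_char, h]

lemma pySetD_none {α : Type} (xs : List α) (i : Int) (v : α) (h : ¬ (-(xs.length:Int) ≤ i ∧ i < xs.length)) :
    PySem.List.pySetD xs i v = xs := by
  simp [PySem.List.pySetD, PySem.List.pySet?, pyIdx?_char, h]

lemma nidxN_lt (len : Nat) (i : Int) (h : -(len:Int) ≤ i ∧ i < len) : nidxN len i < len := by
  unfold nidxN; split_ifs <;> omega

lemma pyGetD_some {α : Type} (xs : List α) (i : Int) (d : α) (h : -(xs.length:Int) ≤ i ∧ i < xs.length) :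
    PySem.List.pyGetD xs i d = xs[nidxN xs.length i]'(nidxN_lt _ _ h) := by
  simp [PySem.List.pyGetD, PySem.List.pyGet?, pyIdx?_char, h, List.getElem?_eq_getElem (nidxN_lt _ _ h)]

lemma pySetD_some {α : Type} (xs : List α) (i : Int) (v : α) (h : -(xs.length:Int) ≤ i ∧ i < xs.length) :
    PySem.List.pySetD xs i v = xs.set (nidxN xs.length i) v := by
  simp [PySem.List.pySetD, PySem.List.pySet?, pyIdx?_char, h]

lemma map_pySetD {α β : Type} (f : α → β) (xs : List α) (i : Int) (v : α) :
    PySem.List.pySetD (xs.map f) i (f v) = (PySem.List.pySetD xs i v).map f := by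
  by_cases h : -(xs.length:Int) ≤ i ∧ i < xs.length
  · rw [pySetD_some _ _ _ (by simpa using h), pySetD_some _ _ _ h]
    simp [List.map_set]
  · rw [pySetD_none _ _ _ (by simpa using h), pySetD_none _ _ _ h]

lemma pyGetD_nat_lt {α : Type} (xs : List α) (j : Nat) (d : α) (hj : j < xs.length) :
    PySem.List.pyGetD xs (j : Int) d = xs[j] := by
  have hn : nidxN xs.length (j : Int) = j := by
    unfold nidxN
    rw [if_neg (by omega)]
    omega
  rw [pyGetD_some _ _ _ (by constructor <;> omega)]
  simp only [hn]

-- B's visited test IS markedness of A's dist (everywhere: the default true is markF 0)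
lemma getD_map_markF (dist : List Int) (w : Int) :
    PySem.List.pyGetD (dist.map markF) w true = markF (PySem.List.pyGetD dist w 0) := by
  have h := PySem.List.pyGetD_map markF dist w 0
  simpa [markF] using h

-- B's marking IS the image of A's dist update
lemma setD_map_markF (dist : List Int) (w : Int) (v : Int) (hv : -1 < v) :
    PySem.List.pySetD (dist.map markF) w true = (PySem.List.pySetD dist w v).map markF := by
  have hfv : markF v = true := by simp [markF]; omega
  rw [← hfv, map_pySetD]

-- dist reads are ≥ -1 when all entries are (the out-of-range default is 0)
lemma getD_ge (dist : List Int) (i : Int) (h : ∀ x ∈ dist, (-1:Int) ≤ x) :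
    -1 ≤ PySem.List.pyGetD dist i 0 := by
  by_cases hr : -(dist.length:Int) ≤ i ∧ i < dist.length
  · rw [pyGetD_some _ _ _ hr]
    exact h _ (List.getElem_mem _)
  · rw [pyGetD_none _ _ _ hr]
    omega

-- flipping exactly one Nodup-list element of the filter predicate drops the count by one
lemma length_filter_flip (l : List Nat) (hl : l.Nodup) (w : Nat) (hw : w ∈ l) (p q : Nat → Bool)
    (hpw : p w = true) (hqw : q w = false) (h : ∀ x ∈ l, x ≠ w → q x = p x) :
    (l.filter q).length + 1 = (l.filter p).length := by
  induction l with
  | nil => cases hw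
  | cons a t ih =>
    rcases List.mem_cons.mp hw with hwa | hwt
    · subst hwa
      have hnt : w ∉ t := (List.nodup_cons.mp hl).1
      have heq : t.filter q = t.filter p := by
        apply List.filter_congr
        intro x hx
        exact h x (List.mem_cons_of_mem _ hx) (fun he => hnt (he ▸ hx))
      simp [hpw, hqw, heq]
    · have haw : a ≠ w := fun he => ((List.nodup_cons.mp hl).1 (he ▸ hwt))
      have hqa : q a = p a := h a (List.mem_cons_self) haw
      have := ih (List.nodup_cons.mp hl).2 hwt (fun x hx hxw => h x (List.mem_cons_of_mem _ hx) hxw)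
      by_cases hpa : p a = true
      · simp [hpa, hqa ▸ hpa]; omega
      · simp only [Bool.not_eq_true] at hpa
        simp [hpa, hqa, this]

-- one popped vertex: A's for-loop over graph[cur] and B's stay in lock-step — the same `new`
-- vertices are appended, cnt gains exactly len(graph[cur]), visited stays the markF image of
-- dist, entries stay ≥ -1, and the number of unmarked slots drops by |new|
lemma innerStep (cur : Int) :
    ∀ (row : List Int) (dist : List Int) (cnt : Int) (app : List Int) (reach : List Int),
    (∀ x ∈ dist, (-1:Int) ≤ x) →
    ∃ (dist' : List Int) (new : List Int),
      row.foldl (fun (s : List Int × Int × List Int) i =>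
          let cnt := s.2.1 + 1
          if PySem.List.pyGetD s.1 i 0 > -1 then (s.1, cnt, s.2.2)
          else (PySem.List.pySetD s.1 i (PySem.List.pyGetD s.1 cur 0 + 1), cnt, s.2.2 ++ [i]))
        (dist, cnt, app) = (dist', cnt + (row.length : Int), app ++ new) ∧
      row.foldl (fun (s : List Bool × List Int) w =>
          if PySem.List.pyGetD s.1 w true then s
          else (PySem.List.pySetD s.1 w true, s.2 ++ [w]))
        (dist.map markF, reach) = (dist'.map markF, reach ++ new) ∧
      (∀ x ∈ dist', (-1:Int) ≤ x) ∧ dist'.length = dist.length ∧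
      unmarkedL dist' + new.length = unmarkedL dist := by
  intro row
  induction row with
  | nil =>
    intro dist cnt app reach hent
    exact ⟨dist, [], by simp, by simp, hent, rfl, by simp⟩
  | cons w t ih =>
    intro dist cnt app reach hent
    simp only [List.foldl_cons]
    by_cases hm : PySem.List.pyGetD dist w 0 > -1
    · -- already visited: both sides skip
      have hBc : PySem.List.pyGetD (dist.map markF) w true = true := by
        rw [getD_map_markF]
        simp [markF]
        omega
      rw [if_pos hm, if_pos hBc]
      obtain ⟨dist', new, h1, h2, h3, h4, h5⟩ := ih dist (cnt + 1) app reach hent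
      refine ⟨dist', new, ?_, h2, h3, h4, h5⟩
      rw [h1]
      have : cnt + ((w :: t).length : Int) = cnt + 1 + (t.length : Int) := by
        simp [List.length_cons]; ring
      rw [this]
    · -- new vertex: A marks dist[w] with a distance, B sets visited[w] and appends w
      have hg : PySem.List.pyGetD dist w 0 ≤ -1 := by omega
      have hBc : PySem.List.pyGetD (dist.map markF) w true = false := by
        rw [getD_map_markF]
        simp [markF]
        omega
      rw [if_neg hm, if_neg (by simp [hBc])]
      -- the skipped default is 0 > -1, so w must be in range of dist
      have hin : -(dist.length:Int) ≤ w ∧ w < dist.length := by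
        by_contra hco
        rw [pyGetD_none _ _ _ hco] at hg
        omega
      have hk : nidxN dist.length w < dist.length := nidxN_lt _ _ hin
      have hgc : -1 ≤ PySem.List.pyGetD dist cur 0 := getD_ge dist cur hent
      set k := nidxN dist.length w with hkdef
      set d2 := dist.set k (PySem.List.pyGetD dist cur 0 + 1) with hd2
      have hset : PySem.List.pySetD dist w (PySem.List.pyGetD dist cur 0 + 1) = d2 :=
        pySetD_some _ _ _ hin
      have hmapset : PySem.List.pySetD (dist.map markF) w true = d2.map markF := by
        rw [setD_map_markF dist w (PySem.List.pyGetD dist cur 0 + 1) (by omega), hset]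
      have hent2 : ∀ x ∈ d2, (-1:Int) ≤ x := by
        intro x hx
        rw [hd2] at hx
        rcases List.mem_or_eq_of_mem_set hx with hx' | rfl
        · exact hent x hx'
        · omega
      have hlen2 : d2.length = dist.length := by rw [hd2, List.length_set]
      have hum : unmarkedL d2 + 1 = unmarkedL dist := by
        unfold unmarkedL
        rw [hlen2]
        apply length_filter_flip (List.range dist.length) (List.nodup_range) k
          (List.mem_range.mpr hk)
        · simp only [decide_eq_true_eq]
          have hgw : PySem.List.pyGetD dist (k : Int) 0 = PySem.List.pyGetD dist w 0 := by
            rw [pyGetD_nat_lt _ _ _ hk, pyGetD_some _ _ _ hin]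
          rw [hgw]
          omega
        · simp only [decide_eq_false_iff_not, not_lt]
          rw [pyGetD_nat_lt d2 k 0 (by omega)]
          simp only [hd2, List.getElem_set_self]
          omega
        · intro x hx hxw
          simp only [decide_eq_decide]
          rw [pyGetD_nat_lt d2 x 0 (by rw [hlen2]; exact List.mem_range.mp hx),
              pyGetD_nat_lt dist x 0 (List.mem_range.mp hx)]
          simp only [hd2]
          rw [List.getElem_set_ne (by omega)]
      rw [hset, hmapset]
      obtain ⟨dist', new, h1, h2, h3, h4, h5⟩ := ih d2 (cnt + 1) (app ++ [w]) (reach ++ [w]) hent2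
      refine ⟨dist', w :: new, ?_, ?_, h3, by omega, by simp only [List.length_cons]; omega⟩
      · rw [h1]
        have e1 : cnt + ((w :: t).length : Int) = cnt + 1 + (t.length : Int) := by
          simp [List.length_cons]; ring
        have e2 : app ++ w :: new = (app ++ [w]) ++ new := by simp
        rw [e1, e2]
      · rw [h2]
        simp

-- B's inner fold only ever appends to reach
lemma foldB_snd_append (row : List Int) :
    ∀ (visited : List Bool) (r : List Int), ∃ t,
      (row.foldl (fun (s : List Bool × List Int) w =>
        if PySem.List.pyGetD s.1 w true then s
        else (PySem.List.pySetD s.1 w true, s.2 ++ [w])) (visited, r)).2 = r ++ t := by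
  induction row with
  | nil => exact fun visited r => ⟨[], by simp⟩
  | cons w t ih =>
    intro visited r
    simp only [List.foldl_cons]
    by_cases hc : PySem.List.pyGetD visited w true = true
    · rw [if_pos hc]; exact ih visited r
    · rw [if_neg hc]
      obtain ⟨t', ht'⟩ := ih (PySem.List.pySetD visited w true) (r ++ [w])
      exact ⟨w :: t', by rw [ht']; simp⟩

-- hence the final reach list extends any intermediate one
lemma loopB_prefix (graph : List (List Int)) :
    ∀ (fuel : Nat) (visited : List Bool) (reach : List Int) (i : Nat),
      ∃ t, bfsLoopB graph fuel visited reach i = reach ++ t := by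
  intro fuel
  induction fuel with
  | zero => exact fun visited reach i => ⟨[], by simp [bfsLoopB]⟩
  | succ f ih =>
    intro visited reach i
    by_cases hi : i < reach.length
    · obtain ⟨t0, ht0⟩ := foldB_snd_append
        (PySem.List.pyGetD graph (PySem.List.pyGetD reach (i : Int) 0) []) visited reach
      set s := (PySem.List.pyGetD graph (PySem.List.pyGetD reach (i : Int) 0) []).foldl
        (fun (s : List Bool × List Int) w =>
          if PySem.List.pyGetD s.1 w true then s
          else (PySem.List.pySetD s.1 w true, s.2 ++ [w])) (visited, reach) with hs
      obtain ⟨t1, ht1⟩ := ih s.1 s.2 (i+1)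
      refine ⟨t0 ++ t1, ?_⟩
      show (if i < reach.length then bfsLoopB graph f s.1 s.2 (i+1) else reach) = reach ++ (t0 ++ t1)
      rw [if_pos hi, ht1, ht0]
      simp
    · exact ⟨[], by simp [bfsLoopB, if_neg hi]⟩

-- main bisimulation: A's remaining loop (queue = reach.drop i) returns cnt plus the degree sum
-- of the part of B's final reach list that is still to be processed
lemma bisim (graph : List (List Int)) :
    ∀ (fuel : Nat) (dist : List Int) (cnt : Int) (reach : List Int) (i : Nat),
    (∀ x ∈ dist, (-1:Int) ≤ x) →
    (reach.length - i) + 2 * unmarkedL dist < fuel →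
    bfsLoopA graph fuel dist cnt (reach.drop i) =
      cnt + (((bfsLoopB graph fuel (dist.map markF) reach i).drop i).map (degI graph)).sum := by
  intro fuel
  induction fuel with
  | zero => intro dist cnt reach i _ hm; omega
  | succ f ih =>
    intro dist cnt reach i hent hm
    by_cases hi : i < reach.length
    · have hdrop : reach.drop i = reach[i] :: reach.drop (i+1) := List.drop_eq_getElem_cons hi
      obtain ⟨dist', new, hA, hB, hent', hlen', hum⟩ :=
        innerStep reach[i] (PySem.List.pyGetD graph reach[i] []) dist cnt [] reach hent
      -- reduce one step of A
      rw [hdrop]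
      show (bfsLoopA graph f
        ((PySem.List.pyGetD graph reach[i] []).foldl
          (fun (s : List Int × Int × List Int) j =>
            let cnt := s.2.1 + 1
            if PySem.List.pyGetD s.1 j 0 > -1 then (s.1, cnt, s.2.2)
            else (PySem.List.pySetD s.1 j (PySem.List.pyGetD s.1 reach[i] 0 + 1), cnt, s.2.2 ++ [j]))
          (dist, cnt, [])).1
        ((PySem.List.pyGetD graph reach[i] []).foldl
          (fun (s : List Int × Int × List Int) j =>
            let cnt := s.2.1 + 1
            if PySem.List.pyGetD s.1 j 0 > -1 then (s.1, cnt, s.2.2)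
            else (PySem.List.pySetD s.1 j (PySem.List.pyGetD s.1 reach[i] 0 + 1), cnt, s.2.2 ++ [j]))
          (dist, cnt, [])).2.1
        (reach.drop (i+1) ++
          ((PySem.List.pyGetD graph reach[i] []).foldl
          (fun (s : List Int × Int × List Int) j =>
            let cnt := s.2.1 + 1
            if PySem.List.pyGetD s.1 j 0 > -1 then (s.1, cnt, s.2.2)
            else (PySem.List.pySetD s.1 j (PySem.List.pyGetD s.1 reach[i] 0 + 1), cnt, s.2.2 ++ [j]))
          (dist, cnt, [])).2.2)) =
        cnt + (((bfsLoopB graph (f+1) (dist.map markF) reach i).drop i).map (degI graph)).sum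
      rw [hA]
      -- reduce one step of B
      have hgi : PySem.List.pyGetD reach (i : Int) 0 = reach[i] := pyGetD_nat_lt _ _ _ hi
      have hBstep : bfsLoopB graph (f+1) (dist.map markF) reach i
          = bfsLoopB graph f (dist'.map markF) (reach ++ new) (i+1) := by
        show (if i < reach.length then _ else reach) = _
        rw [if_pos hi]
        simp only [hgi, hB]
      rw [hBstep]
      have hnewdrop : (reach ++ new).drop (i+1) = reach.drop (i+1) ++ new :=
        List.drop_append_of_le_length hi
      have hIH := ih dist' (cnt + ((PySem.List.pyGetD graph reach[i] []).length : Int))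
        (reach ++ new) (i+1) hent' (by
          simp only [List.length_append]
          omega)
      rw [hnewdrop] at hIH
      simp only [List.nil_append]
      simp only [hIH]
      -- align the two drops of the final reach list
      obtain ⟨t, ht⟩ := loopB_prefix graph f (dist'.map markF) (reach ++ new) (i+1)
      rw [ht]
      have hlt : i < ((reach ++ new) ++ t).length := by simp; omega
      have egi : ((reach ++ new) ++ t)[i] = reach[i] := by
        rw [List.getElem_append_left (by simp; omega), List.getElem_append_left hi]
      have e1 : ((reach ++ new) ++ t).drop i = reach[i] :: ((reach ++ new) ++ t).drop (i+1) := by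
        rw [List.drop_eq_getElem_cons hlt, egi]
      rw [e1]
      simp only [List.map_cons, List.sum_cons, degI]
      ring
    · have hdrop : reach.drop i = [] := List.drop_eq_nil_of_le (by omega)
      have hBv : bfsLoopB graph (f+1) (dist.map markF) reach i = reach := by
        show (if i < reach.length then _ else reach) = reach
        rw [if_neg hi]
      rw [hdrop, hBv, hdrop]
      show cnt = cnt + (([] : List Int).map (degI graph)).sum
      simp

-- instantiating the bisimulation at the initial states of both programs
lemma bfs_eq_alt (graph : List (List Int)) (n : Int) (start : Int) :
    bfs graph n start = bfs_alt graph n start := by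
  show PySem.Int.floordiv
      (bfsLoopA graph (2 * n.toNat + 2)
        (PySem.List.pySetD (List.replicate n.toNat (-1)) start 0) 0 [start]) 2 =
    PySem.Int.floordiv
      ((bfsLoopB graph (2 * n.toNat + 2)
          (PySem.List.pySetD (List.replicate n.toNat false) start true) [start] 0).foldl
        (fun acc v => acc + ((PySem.List.pyGetD graph v []).length : Int)) 0) 2
  set dist0 := PySem.List.pySetD (List.replicate n.toNat (-1)) start 0 with hd0
  have hvis : PySem.List.pySetD (List.replicate n.toNat false) start true = dist0.map markF := by
    have h1 : (List.replicate n.toNat (-1 : Int)).map markF = List.replicate n.toNat false := by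
      simp [List.map_replicate, markF]
    have h2 := map_pySetD markF (List.replicate n.toNat (-1)) start 0
    rw [h1] at h2
    have h3 : markF 0 = true := rfl
    rw [h3] at h2
    exact h2
  have hent0 : ∀ x ∈ dist0, (-1:Int) ≤ x := by
    intro x hx
    rw [hd0] at hx
    by_cases hr : -((List.replicate n.toNat (-1:Int)).length:Int) ≤ start ∧
        start < (List.replicate n.toNat (-1:Int)).length
    · rw [pySetD_some _ _ _ hr] at hx
      rcases List.mem_or_eq_of_mem_set hx with hx' | rfl
      · have := List.eq_of_mem_replicate hx'
        omega
      · omega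
    · rw [pySetD_none _ _ _ hr] at hx
      have := List.eq_of_mem_replicate hx
      omega
  have hlen0 : dist0.length = n.toNat := by
    rw [hd0, PySem.List.length_pySetD, List.length_replicate]
  have hmeas : (([start] : List Int).length - 0) + 2 * unmarkedL dist0 < 2 * n.toNat + 2 := by
    have := List.length_filter_le
      (fun (j : Nat) => decide (PySem.List.pyGetD dist0 (j : Int) 0 < 0)) (List.range dist0.length)
    unfold unmarkedL
    simp only [List.length_range] at this
    simp only [List.length_singleton]
    omega
  have hmain := bisim graph (2 * n.toNat + 2) dist0 0 [start] 0 hent0 hmeas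
  simp only [List.drop_zero] at hmain
  rw [hvis, hmain, PySem.List.foldl_add _ (fun v => ((PySem.List.pyGetD graph v []).length : Int)) 0]
  rfl

-- ===== VERDICT (by name: the statement is the Claim_ definition above) =====
theorem bfs_spec : Claim_equal_bfs := by
  intro graph n start _ _
  exact bfs_eq_alt graph n start
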